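-- pv_equiv track=rewrite | github.com/suminS2sumin/Programmers | 프로그래머스/0/181881. 조건에 맞게 수열 변환하기 2/조건에 맞게 수열 변환하기 2.py | solution
-- ===== SOURCE A (Python) =====
-- def solution(arr):
--     x = 0
--     while True:
--         changed = False
--         for i in range(len(arr)):
--             if arr[i] >= 50 and arr[i] % 2 == 0:
--                 arr[i] = arr[i] // 2
--                 changed = True
--             elif arr[i] < 50 and arr[i] % 2 == 1:
--                 arr[i] = arr[i] * 2 + 1
--                 changed = True
--         if changed:
--             x += 1
--         else:
--             break
--     return x
-- ===== SOURCE B (Python) =====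
-- def solution(arr):
--     # Per-element: each element's trajectory is independent, so the number of
--     # rounds of A's whole-array simulation equals the max, over elements, of
--     # the number of steps that element needs to reach its fixed point.
--     best = 0
--     for i in range(len(arr)):
--         v = arr[i]
--         k = 0
--         while (v >= 50 and v % 2 == 0) or (v < 50 and v % 2 == 1):
--             if v >= 50 and v % 2 == 0:
--                 v = v // 2
--             else:
--                 v = v * 2 + 1
--             k += 1
--         arr[i] = v
--         best = max(best, k)
--     return best
-- ===== Notes on version B (the rewrite author's own statement) =====
-- stated objective: alternative
-- what changed: Replaces A's whole-array round-by-round simulation with a per-element steps-to-fixed-point count (each element's trajectory is independent), returning the maximum step count; total work drops from n*maxsteps to the sum of per-element steps.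
import Mathlib
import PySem

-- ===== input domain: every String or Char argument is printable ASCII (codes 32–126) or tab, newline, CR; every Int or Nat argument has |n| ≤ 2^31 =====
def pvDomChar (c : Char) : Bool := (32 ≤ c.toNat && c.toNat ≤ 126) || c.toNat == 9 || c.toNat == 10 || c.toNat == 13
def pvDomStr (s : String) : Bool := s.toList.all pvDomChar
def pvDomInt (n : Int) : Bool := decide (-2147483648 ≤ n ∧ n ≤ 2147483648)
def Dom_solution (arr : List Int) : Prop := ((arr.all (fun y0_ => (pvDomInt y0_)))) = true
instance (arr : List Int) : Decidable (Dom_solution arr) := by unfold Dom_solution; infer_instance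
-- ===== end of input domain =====

-- B counts, per element, the steps to that element's fixed point and returns the max
-- (alternative decomposition; A simulates whole-array rounds). Both Pythons mutate arr
-- to the same final stable values; the equivalence proved here is about the return value.

-- ===== PORT A =====
-- fuel bound for A's unbounded `while True` loop (totality guard only; both ports use the
-- same bound, so they agree even where the Pythons loop forever — arrays with a negative
-- odd element, on which neither Python returns)
def pvFuel : Nat := 2147483848

-- one iteration of A's `for i in range(len(arr))` body: new value and whether a rule fired
def pvApply (a : Int) : Int × Bool :=
  if (50 ≤ a && PySem.Int.mod a 2 == 0) then (PySem.Int.floordiv a 2, true)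
  else if (a < 50 && PySem.Int.mod a 2 == 1) then (a * 2 + 1, true)
  else (a, false)

-- A's inner for-loop over the array, threading the `changed` flag
def pvRound : List Int → List Int × Bool
  | [] => ([], false)
  | a :: t =>
    let p := pvApply a
    let r := pvRound t
    (p.1 :: r.1, p.2 || r.2)

-- A's outer `while True` loop, x = rounds counted so far
def pvLoop : Nat → List Int → Int → Int
  | 0, _, x => x
  | f + 1, arr, x =>
    let r := pvRound arr
    if r.2 then pvLoop f r.1 (x + 1) else x

def solution (arr : List Int) : Int := pvLoop pvFuel arr 0

-- ===== PORT B =====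
-- B's `while` condition on a single element
def pvCondB (v : Int) : Bool :=
  ((50 ≤ v) && (PySem.Int.mod v 2 == 0)) || ((v < 50) && (PySem.Int.mod v 2 == 1))

-- B's conditional expression inside the while body
def pvStepB (v : Int) : Int :=
  if (50 ≤ v && PySem.Int.mod v 2 == 0) then PySem.Int.floordiv v 2 else v * 2 + 1

-- B's per-element while loop, k = steps taken so far (fuel = totality guard only)
def pvCount : Nat → Int → Int → Int
  | 0, _, k => k
  | f + 1, v, k => if pvCondB v then pvCount f (pvStepB v) (k + 1) else k

def solution_alt (arr : List Int) : Int :=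
  arr.foldl (fun best a => max best (pvCount pvFuel a 0)) 0

-- ===== PRECONDITION & SPEC =====
def Spec_solution (arr : List Int) (out : Int) : Prop := out = solution_alt arr
instance (arr : List Int) (out : Int) : Decidable (Spec_solution arr out) := by unfold Spec_solution; infer_instance

-- ===== CLAIM (what is proved, stated in full; the proofs are below) =====
def Claim_equal_solution : Prop := ∀ (arr : List Int), Dom_solution arr → Spec_solution arr (solution arr)

-- ===== LEMMAS AND PROOFS =====

-- proof-side names for one element-update: new value and fired flag
def pvS (a : Int) : Int := (pvApply a).1
def pvC (a : Int) : Bool := (pvApply a).2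

-- m g l = foldr-max of g over l, base 0
def pvM (g : Int → Int) (l : List Int) : Int := (l.map g).foldr max 0

lemma pvCondB_eq (v : Int) : pvCondB v = pvC v := by
  unfold pvCondB pvC pvApply
  cases h1 : ((50 ≤ v) && (PySem.Int.mod v 2 == 0)) <;>
    cases h2 : ((v < 50) && (PySem.Int.mod v 2 == 1)) <;> simp [h1, h2]

lemma pvStepB_eq (v : Int) (h : pvC v = true) : pvStepB v = pvS v := by
  unfold pvC pvApply at h
  unfold pvStepB pvS pvApply
  cases h1 : ((50 ≤ v) && (PySem.Int.mod v 2 == 0))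
  · cases h2 : ((v < 50) && (PySem.Int.mod v 2 == 1))
    · rw [if_neg (by rw [h1]; simp), if_neg (by rw [h2]; simp)] at h
      simp at h
    · simp [h1, h2]
  · simp [h1]

lemma pvCount_step (f : Nat) (v k : Int) :
    pvCount (f + 1) v k = if pvC v then pvCount f (pvS v) (k + 1) else k := by
  simp only [pvCount, pvCondB_eq]
  by_cases h : pvC v = true
  · simp [h, pvStepB_eq v h]
  · simp [h]

lemma pvS_id (v : Int) (h : pvC v = false) : pvS v = v := by
  unfold pvC pvApply at h
  unfold pvS pvApply
  split_ifs at h ⊢ <;> simp_all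

lemma pvRound_eq (l : List Int) : pvRound l = (l.map pvS, l.any pvC) := by
  induction l with
  | nil => simp [pvRound]
  | cons a t ih => simp [pvRound, ih, pvS, pvC]

lemma pvCount_shift (f : Nat) : ∀ (v k : Int), pvCount f v k = k + pvCount f v 0 := by
  induction f with
  | zero => intro v k; simp [pvCount]
  | succ f ih =>
    intro v k
    rw [pvCount_step, pvCount_step]
    by_cases h : pvC v
    · simp only [h, if_true]
      rw [ih (pvS v) (k + 1), ih (pvS v) (0 + 1)]
      ring
    · simp [h]

lemma pvCount_nonneg (f : Nat) : ∀ (v : Int), 0 ≤ pvCount f v 0 := by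
  induction f with
  | zero => intro v; simp [pvCount]
  | succ f ih =>
    intro v
    rw [pvCount_step]
    by_cases h : pvC v
    · simp [h]; rw [pvCount_shift]; have := ih (pvS v); omega
    · simp [h]

lemma pvCount_zero (f : Nat) (v : Int) (h : pvC v = false) : pvCount f v 0 = 0 := by
  cases f with
  | zero => simp [pvCount]
  | succ f => rw [pvCount_step]; simp [h]

lemma pvM_nonneg (g : Int → Int) (l : List Int) : 0 ≤ pvM g l := by
  induction l with
  | nil => simp [pvM]
  | cons a t ih => simp only [pvM, List.map_cons, List.foldr_cons] at ih ⊢; omega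

lemma pvM_zero (g : Int → Int) (l : List Int) (h : ∀ a ∈ l, g a = 0) : pvM g l = 0 := by
  induction l with
  | nil => simp [pvM]
  | cons a t ih =>
    simp only [pvM, List.map_cons, List.foldr_cons]
    rw [h a (by simp)]
    have := ih (fun b hb => h b (by simp [hb]))
    simp only [pvM] at this
    omega

lemma pvFoldl_max (g : Int → Int) (l : List Int) : ∀ (b : Int), 0 ≤ b →
    l.foldl (fun acc a => max acc (g a)) b = max b (pvM g l) := by
  induction l with
  | nil =>
    intro b hb
    simp only [List.foldl_nil, pvM, List.map_nil, List.foldr_nil]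
    omega
  | cons a t ih =>
    intro b hb
    simp only [List.foldl_cons]
    rw [ih (max b (g a)) (by omega)]
    simp only [pvM, List.map_cons, List.foldr_cons]
    have := pvM_nonneg g t
    simp only [pvM] at this
    omega

lemma pvKey (f : Nat) : ∀ (l : List Int), l.any pvC = true →
    max 0 (pvM (fun a => pvCount (f + 1) a 0) l) = 1 + max 0 (pvM (fun a => pvCount f (pvS a) 0) l) := by
  intro l
  induction l with
  | nil => simp
  | cons a t ih =>
    intro hany
    simp only [pvM, List.map_cons, List.foldr_cons]
    have hc' : pvCount (f + 1) a 0 = if pvC a then 1 + pvCount f (pvS a) 0 else 0 := by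
      rw [pvCount_step]
      by_cases h : pvC a
      · simp [h]; rw [pvCount_shift]
      · simp [h]
    have hda : 0 ≤ pvCount f (pvS a) 0 := pvCount_nonneg f (pvS a)
    have hmt : 0 ≤ pvM (fun a => pvCount (f + 1) a 0) t := pvM_nonneg _ t
    have hmt' : 0 ≤ pvM (fun a => pvCount f (pvS a) 0) t := pvM_nonneg _ t
    by_cases ha : pvC a
    · rw [hc']; simp only [ha, if_true]
      by_cases ht : t.any pvC = true
      · have := ih ht
        simp only [pvM] at this hmt hmt' ⊢
        omega
      · have htz : ∀ b ∈ t, pvC b = false := by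
          intro b hb
          by_contra hcb
          exact ht (List.any_eq_true.mpr ⟨b, hb, by simpa using hcb⟩)
        have h1 : pvM (fun a => pvCount (f + 1) a 0) t = 0 :=
          pvM_zero _ t (fun b hb => pvCount_zero _ b (htz b hb))
        have h2 : pvM (fun a => pvCount f (pvS a) 0) t = 0 :=
          pvM_zero _ t (fun b hb => by rw [pvS_id b (htz b hb)]; exact pvCount_zero _ b (htz b hb))
        simp only [pvM] at h1 h2 ⊢
        omega
    · have ht : t.any pvC = true := by
        simp only [List.any_cons, ha, Bool.false_or] at hany
        exact hany
      have hda0 : pvCount f (pvS a) 0 = 0 := by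
        rw [pvS_id a (by simpa using ha)]
        exact pvCount_zero f a (by simpa using ha)
      rw [hc']; simp only [ha, Bool.false_eq_true, if_false]
      have := ih ht
      simp only [pvM] at this hmt hmt' ⊢
      omega

lemma pvMaster (f : Nat) : ∀ (l : List Int) (x : Int),
    pvLoop f l x = x + max 0 (pvM (fun a => pvCount f a 0) l) := by
  induction f with
  | zero =>
    intro l x
    have : pvM (fun a => pvCount 0 a 0) l = 0 := pvM_zero _ l (fun a _ => by simp [pvCount])
    simp [pvLoop, this]
  | succ f ih =>
    intro l x
    show (let r := pvRound l; if r.2 then pvLoop f r.1 (x + 1) else x) = _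
    rw [pvRound_eq]
    by_cases hany : l.any pvC = true
    · simp only [hany, if_true]
      rw [ih (l.map pvS) (x + 1)]
      have hmm : pvM (fun a => pvCount f a 0) (l.map pvS) = pvM (fun a => pvCount f (pvS a) 0) l := by
        simp [pvM, List.map_map, Function.comp_def]
      rw [hmm, pvKey f l hany]
      have := pvM_nonneg (fun a => pvCount f (pvS a) 0) l
      omega
    · simp only [hany]
      have htz : ∀ b ∈ l, pvC b = false := by
        intro b hb
        by_contra hcb
        exact hany (List.any_eq_true.mpr ⟨b, hb, by simpa using hcb⟩)
      have : pvM (fun a => pvCount (f + 1) a 0) l = 0 :=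
        pvM_zero _ l (fun b hb => pvCount_zero _ b (htz b hb))
      simp [this]

-- ===== VERDICT (by name: the statement is the Claim_ definition above) =====
theorem solution_spec : Claim_equal_solution := by
  intro arr _
  unfold Spec_solution solution solution_alt
  rw [pvMaster pvFuel arr 0, pvFoldl_max (fun a => pvCount pvFuel a 0) arr 0 (le_refl 0)]
  omega
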